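-- pv_equiv track=rewrite | github.com/descon-uccs/resalloc-playing | resalloc-stability.py | createISetPrimal
-- ===== SOURCE A (Python) =====
-- def createISetPrimal(n) :
--     I = set()
--     for a in range(n+1) :
--         for x in range(n+1) :
--             for b in range(n+1) :
--                 if a+x+b>0 and a+x+b<n+1 :
--                     I.add((a,x,b))
--     return I
-- ===== SOURCE B (Python) =====
-- def createISetPrimal(n):
--     def suffixes(m):
--         # all pairs (x, b) of nonnegative ints with x + b <= m, lexicographic
--         return [(x, b) for x in range(m + 1) for b in range(m + 1 - x)]
--     triples = [(a, x, b) for a in range(n + 1) for (x, b) in suffixes(n - a)]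
--     return set(triples[1:])  # triples[0] is (0,0,0), the only sum-0 triple
-- ===== Notes on version B (the rewrite author's own statement) =====
-- stated objective: alternative
-- what changed: B enumerates only the sum-bounded triples directly (for each a it generates suffix pairs (x,b) with x+b <= n-a, b's range computed from the remaining budget) and drops the single zero-sum triple, instead of A's scan of the full (n+1)^3 cube with a sum-window filter on every cell.
import Mathlib
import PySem

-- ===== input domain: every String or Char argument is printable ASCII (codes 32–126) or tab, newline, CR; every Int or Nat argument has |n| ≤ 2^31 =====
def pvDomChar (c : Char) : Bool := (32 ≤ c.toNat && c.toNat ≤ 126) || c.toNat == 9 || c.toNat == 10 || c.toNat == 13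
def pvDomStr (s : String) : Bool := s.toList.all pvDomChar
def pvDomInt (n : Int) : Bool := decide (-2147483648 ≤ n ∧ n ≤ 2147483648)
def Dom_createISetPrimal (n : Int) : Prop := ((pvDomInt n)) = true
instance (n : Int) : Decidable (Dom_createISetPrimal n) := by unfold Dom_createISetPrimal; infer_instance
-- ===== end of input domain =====

-- B enumerates only the sum-bounded suffix pairs (b's range is computed from the remaining
-- budget, no filter test) and drops the single zero-sum triple, instead of A's full
-- (n+1)^3 cube filtered by the sum window (objective: alternative decomposition).

-- ===== PORT A =====
def createISetPrimal (n : Int) : List (Int × Int × Int) :=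
  (PySem.List.pyRange 0 (n + 1) 1).foldl (fun I a =>
    (PySem.List.pyRange 0 (n + 1) 1).foldl (fun I x =>
      (PySem.List.pyRange 0 (n + 1) 1).foldl (fun I b =>
        if a + x + b > 0 ∧ a + x + b < n + 1 then PySem.Set.add I (a, x, b) else I) I) I)
    PySem.Set.empty

-- ===== PORT B =====
-- suffixes(m): all pairs (x, b) of nonnegative ints with x + b <= m, lexicographic
def pvSuffixes (m : Int) : List (Int × Int) :=
  (PySem.List.pyRange 0 (m + 1) 1).flatMap (fun x =>
    (PySem.List.pyRange 0 (m + 1 - x) 1).map (fun b => (x, b)))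

def createISetPrimal_alt (n : Int) : List (Int × Int × Int) :=
  let triples := (PySem.List.pyRange 0 (n + 1) 1).flatMap (fun a =>
    (pvSuffixes (n - a)).map (fun p => (a, p.1, p.2)))
  PySem.Set.ofList (triples.drop 1)

-- ===== PRECONDITION & SPEC =====
def Spec_createISetPrimal (n : Int) (out : List (Int × Int × Int)) : Prop := out = createISetPrimal_alt n
instance (n : Int) (out : List (Int × Int × Int)) : Decidable (Spec_createISetPrimal n out) := by unfold Spec_createISetPrimal; infer_instance

-- ===== CLAIM (what is proved, stated in full; the proofs are below) =====
def Claim_equal_createISetPrimal : Prop := ∀ (n : Int), Dom_createISetPrimal n → Spec_createISetPrimal n (createISetPrimal n)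

-- ===== LEMMAS AND PROOFS =====

-- the lexicographic list A's triple loop inserts (all insertions are fresh, so the Set is its ofList)
def bigA (n : Int) : List (Int × Int × Int) :=
  (PySem.List.pyRange 0 (n + 1) 1).flatMap (fun a =>
    (PySem.List.pyRange 0 (n + 1) 1).flatMap (fun x =>
      ((PySem.List.pyRange 0 (n + 1) 1).filter
        (fun b => decide (a + x + b > 0 ∧ a + x + b < n + 1))).map (fun b => (a, x, b))))

-- two strictly increasing Int lists with the same members are equal
lemma eq_of_mem_iff_of_pairwise_lt (l1 l2 : List Int) (h1 : l1.Pairwise (· < ·))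
    (h2 : l2.Pairwise (· < ·)) (h : ∀ v, v ∈ l1 ↔ v ∈ l2) : l1 = l2 :=
  List.Perm.eq_of_pairwise (fun a b _ _ hab hba => absurd hab (by omega)) h1 h2
    ((List.perm_ext_iff_of_nodup h1.nodup h2.nodup).mpr h)

-- A's sum-window filter over the full b-range is a computed subrange
lemma filter_eq_subrange (n a x : Int) (ha : 0 ≤ a) (hx : 0 ≤ x) :
    (PySem.List.pyRange 0 (n + 1) 1).filter
      (fun b => decide (a + x + b > 0 ∧ a + x + b < n + 1))
    = PySem.List.pyRange (max 0 (1 - (a + x))) (n + 1 - (a + x)) 1 := by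
  apply eq_of_mem_iff_of_pairwise_lt
  · exact (PySem.List.pairwise_lt_pyRange_one 0 (n+1)).filter _
  · exact PySem.List.pairwise_lt_pyRange_one _ _
  · intro v
    simp only [List.mem_filter, PySem.List.mem_pyRange_one, decide_eq_true_eq]
    omega

-- peel off index 0 of a flatMap over range(0, m)
lemma flatMap_cons_zero {α : Type} (m : Int) (f : Int → List α) (h : (0:Int) < m) :
    (PySem.List.pyRange 0 m 1).flatMap f = f 0 ++ (PySem.List.pyRange 1 m 1).flatMap f := by
  rw [PySem.List.pyRange_one_cons h, List.flatMap_cons]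
  norm_num

-- the x-range of A's filtered loop can stop at n - a: beyond it every b-subrange is empty
lemma inner_trim (n a : Int) (ha : 0 ≤ a) (han : a ≤ n) :
    (PySem.List.pyRange 0 (n + 1) 1).flatMap (fun x =>
      (PySem.List.pyRange (max 0 (1 - (a + x))) (n + 1 - (a + x)) 1).map (fun b => ((a:Int), x, b)))
    = (PySem.List.pyRange 0 (n - a + 1) 1).flatMap (fun x =>
      (PySem.List.pyRange (max 0 (1 - (a + x))) (n - a + 1 - x) 1).map (fun b => (a, x, b))) := by
  rw [PySem.List.pyRange_one_append 0 (n - a + 1) (n + 1) (by omega) (by omega), List.flatMap_append]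
  have h2 : (PySem.List.pyRange (n - a + 1) (n + 1) 1).flatMap (fun x =>
      (PySem.List.pyRange (max 0 (1 - (a + x))) (n + 1 - (a + x)) 1).map (fun b => ((a:Int), x, b))) = [] := by
    rw [List.flatMap_congr (g := fun _ => []) ?_]
    · simp
    · intro x hx
      rw [PySem.List.mem_pyRange_one] at hx
      rw [PySem.List.pyRange_one_eq_nil (by omega), List.map_nil]
  rw [h2, List.append_nil]
  apply List.flatMap_congr
  intro x hx
  rw [show n + 1 - (a + x) = n - a + 1 - x by ring]

-- A's nested Set.add loop is Set.ofList of the lexicographic filtered list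
lemma foldA_eq (n : Int) : createISetPrimal n = PySem.Set.ofList (bigA n) := by
  rw [PySem.Set.ofList_eq_foldl, bigA, List.foldl_flatMap, createISetPrimal]
  apply PySem.List.foldl_congr_mem
  intro I a _
  rw [List.foldl_flatMap]
  apply PySem.List.foldl_congr_mem
  intro J x _
  rw [List.foldl_map, PySem.List.foldl_ite_eq_foldl_filter]

-- B's sum-bounded enumeration is (0,0,0) followed by A's filtered list
lemma triples_eq (n : Int) (hn : 0 ≤ n) :
    (PySem.List.pyRange 0 (n + 1) 1).flatMap (fun a =>
      (pvSuffixes (n - a)).map (fun p => (a, p.1, p.2)))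
    = (0, 0, 0) :: bigA n := by
  have hB : ∀ a : Int, (pvSuffixes (n - a)).map (fun p => ((a:Int), p.1, p.2))
      = (PySem.List.pyRange 0 (n - a + 1) 1).flatMap (fun x =>
          (PySem.List.pyRange 0 (n - a + 1 - x) 1).map (fun b => (a, x, b))) := by
    intro a
    simp only [pvSuffixes, List.map_flatMap, List.map_map, Function.comp_def]
  have hA : bigA n = (PySem.List.pyRange 0 (n + 1) 1).flatMap (fun a =>
      (PySem.List.pyRange 0 (n - a + 1) 1).flatMap (fun x =>
        (PySem.List.pyRange (max 0 (1 - (a + x))) (n - a + 1 - x) 1).map (fun b => (a, x, b)))) := by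
    rw [bigA]
    apply List.flatMap_congr
    intro a haM
    rw [PySem.List.mem_pyRange_one] at haM
    rw [← inner_trim n a (by omega) (by omega)]
    apply List.flatMap_congr
    intro x hxM
    rw [PySem.List.mem_pyRange_one] at hxM
    rw [filter_eq_subrange n a x (by omega) (by omega)]
  simp only [hB, hA]
  rw [flatMap_cons_zero (n + 1) _ (by omega), flatMap_cons_zero (n + 1) _ (by omega)]
  have htails : (PySem.List.pyRange 1 (n + 1) 1).flatMap (fun a =>
      (PySem.List.pyRange 0 (n - a + 1) 1).flatMap (fun x =>
        (PySem.List.pyRange 0 (n - a + 1 - x) 1).map (fun b => ((a:Int), x, b))))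
      = (PySem.List.pyRange 1 (n + 1) 1).flatMap (fun a =>
      (PySem.List.pyRange 0 (n - a + 1) 1).flatMap (fun x =>
        (PySem.List.pyRange (max 0 (1 - (a + x))) (n - a + 1 - x) 1).map (fun b => (a, x, b)))) := by
    apply List.flatMap_congr
    intro a haM
    rw [PySem.List.mem_pyRange_one] at haM
    apply List.flatMap_congr
    intro x hxM
    rw [PySem.List.mem_pyRange_one] at hxM
    rw [show max 0 (1 - (a + x)) = 0 by omega]
  rw [htails]
  rw [flatMap_cons_zero (n - 0 + 1) _ (by omega), flatMap_cons_zero (n - 0 + 1) _ (by omega)]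
  have hxtails : (PySem.List.pyRange 1 (n - 0 + 1) 1).flatMap (fun x =>
      (PySem.List.pyRange 0 (n - 0 + 1 - x) 1).map (fun b => ((0:Int), x, b)))
      = (PySem.List.pyRange 1 (n - 0 + 1) 1).flatMap (fun x =>
      (PySem.List.pyRange (max 0 (1 - (0 + x))) (n - 0 + 1 - x) 1).map (fun b => ((0:Int), x, b))) := by
    apply List.flatMap_congr
    intro x hxM
    rw [PySem.List.mem_pyRange_one] at hxM
    rw [show max 0 (1 - (0 + x)) = 0 by omega]
  rw [hxtails]
  rw [show max 0 (1 - ((0:Int) + 0)) = 1 by norm_num]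
  rw [show (PySem.List.pyRange 0 (n - 0 + 1 - 0) 1) = 0 :: PySem.List.pyRange 1 (n - 0 + 1 - 0) 1
        from PySem.List.pyRange_one_cons (by omega)]
  rw [List.map_cons]
  simp

lemma main_eq (n : Int) : createISetPrimal n = createISetPrimal_alt n := by
  rcases le_or_gt 0 n with hn | hn
  · rw [foldA_eq, createISetPrimal_alt]
    simp only [triples_eq n hn, List.drop_one, List.tail_cons]
  · have h : PySem.List.pyRange 0 (n + 1) 1 = [] := PySem.List.pyRange_one_eq_nil (by omega)
    rw [foldA_eq, createISetPrimal_alt, bigA]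
    simp [h]

-- ===== VERDICT (by name: the statement is the Claim_ definition above) =====
theorem createISetPrimal_spec : Claim_equal_createISetPrimal := by
  intro n _
  unfold Spec_createISetPrimal
  exact main_eq n
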